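-- pv_equiv track=rewrite | github.com/stebach/AdventOfCode | years/2024/day22/solve_2024_22.py | get_most_bananas_by_sequence
-- ===== SOURCE A (Python) =====
-- def secret_number(data, times = 1):
--     number = data
--     for x in range(times):
--         number = ((number * 64) ^ number) % 16777216
--         number = ((number // 32) ^ number) % 16777216
--         number = ((number * 2048) ^ number) % 16777216
--
--     return number
--
-- def get_most_bananas_by_sequence(data):
--     sequences = {}
--     for starting_number in data:
--         current_number = starting_number
--         current_sequence = []
--         seen = set()
--         for x in range(2000):
--             next_number = secret_number(current_number)
--             current_sequence.append(next_number % 10 - current_number % 10)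
--             if len(current_sequence) > 4:
--                 current_sequence.pop(0)
--             if len(current_sequence) == 4:
--                 current_sequence_tuple = tuple(current_sequence)
--                 if current_sequence_tuple not in seen:
--                     seen.add(current_sequence_tuple)
--                     if current_sequence_tuple not in sequences:
--                         sequences[current_sequence_tuple] = next_number % 10
--                     else:
--                         sequences[current_sequence_tuple] += next_number % 10
--             current_number = next_number
--     return max(sequences.values())
-- ===== SOURCE B (Python) =====
-- def _next_secret(n):
--     n = ((n * 64) ^ n) % 16777216
--     n = ((n // 32) ^ n) % 16777216
--     n = ((n * 2048) ^ n) % 16777216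
--     return n
--
-- def get_most_bananas_by_sequence(data):
--     totals = {}
--     for starting_number in data:
--         # phase 1: the full price list (length 2001)
--         prices = []
--         n = starting_number
--         prices.append(n % 10)
--         for _ in range(2000):
--             n = _next_secret(n)
--             prices.append(n % 10)
--         # phase 2: the 2000 consecutive price differences
--         diffs = [prices[i + 1] - prices[i] for i in range(2000)]
--         # phase 3: windowed pass, crediting prices[i+4] to the first occurrence per buyer
--         seen = set()
--         for i in range(len(diffs) - 3):
--             seq = tuple(diffs[i:i + 4])
--             if seq not in seen:
--                 seen.add(seq)
--                 totals[seq] = totals.get(seq, 0) + prices[i + 4]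
--     return max(totals.values())
-- ===== Notes on version B (the rewrite author's own statement) =====
-- stated objective: alternative
-- what changed: Replaces A's single 2000-step loop per buyer (mutable 4-element sliding window with pop(0) and insert-or-add dict branching) by three separate phases per buyer: build the full 2001-price list, build the 2000-element diff list, then a windowed index pass crediting prices[i+4] to each first-seen 4-diff slice via dict get().
import Mathlib
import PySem

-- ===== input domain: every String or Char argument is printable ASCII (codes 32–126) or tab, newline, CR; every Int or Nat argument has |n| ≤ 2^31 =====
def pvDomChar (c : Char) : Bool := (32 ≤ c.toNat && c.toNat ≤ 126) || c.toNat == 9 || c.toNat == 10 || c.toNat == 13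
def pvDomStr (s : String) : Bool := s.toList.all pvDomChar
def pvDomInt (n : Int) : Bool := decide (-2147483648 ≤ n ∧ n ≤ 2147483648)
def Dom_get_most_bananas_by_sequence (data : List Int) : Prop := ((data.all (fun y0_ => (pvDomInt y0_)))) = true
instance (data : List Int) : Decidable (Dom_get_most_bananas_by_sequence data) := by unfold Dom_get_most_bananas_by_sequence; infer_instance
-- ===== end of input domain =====

-- B re-derives each buyer's answer in three separate phases (full price list, diff list, windowed
-- pass over indices) instead of A's single 2000-step loop with a mutable 4-element sliding window;
-- objective: alternative structure, same exact result.

-- ===== PORT A =====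
def secret_number (data : Int) (times : Int) : Int :=
  (PySem.List.pyRange 0 times 1).foldl
    (fun number _ =>
      let n1 := PySem.Int.mod (PySem.Int.bxor (number * 64) number) 16777216
      let n2 := PySem.Int.mod (PySem.Int.bxor (PySem.Int.floordiv n1 32) n1) 16777216
      PySem.Int.mod (PySem.Int.bxor (n2 * 2048) n2) 16777216)
    data

-- Python's dict/set here are hashed containers consumed order-independently (the function only
-- returns the max over the dict's values), so Std.HashMap / Std.HashSet port them exactly.
def pvAStep (st : Int × List Int × Std.HashSet (List Int) × Std.HashMap (List Int) Int) :
    Int × List Int × Std.HashSet (List Int) × Std.HashMap (List Int) Int :=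
  let current_number := st.1
  let seen := st.2.2.1
  let sequences := st.2.2.2
  let next_number := secret_number current_number 1
  let cs1 := st.2.1 ++ [PySem.Int.mod next_number 10 - PySem.Int.mod current_number 10]
  let cs2 :=
    if PySem.List.len cs1 > 4 then
      match PySem.List.pop? cs1 0 with
      | some r => r.2
      | none => cs1            -- unreachable: cs1 is nonempty here
    else cs1
  if PySem.List.len cs2 == 4 then
    if ! seen.contains cs2 then
      (next_number, cs2, seen.insert cs2,
        if ! sequences.contains cs2 then
          sequences.insert cs2 (PySem.Int.mod next_number 10)
        else
          sequences.insert cs2 (sequences.getD cs2 0 + PySem.Int.mod next_number 10))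
    else (next_number, cs2, seen, sequences)
  else (next_number, cs2, seen, sequences)

def get_most_bananas_by_sequence (data : List Int) : Int :=
  let sequences := data.foldl
    (fun sequences starting_number =>
      ((PySem.List.pyRange 0 2000 1).foldl (fun st _ => pvAStep st)
        (starting_number, ([] : List Int), (∅ : Std.HashSet (List Int)), sequences)).2.2.2)
    (∅ : Std.HashMap (List Int) Int)
  match PySem.List.max? sequences.values (fun x => x) with
  | some m => m
  | none => 0      -- unreachable under Pre_ (max of an empty dict raises in Python)

-- ===== PORT B =====
def pvNextSecret (n : Int) : Int :=
  let a := PySem.Int.mod (PySem.Int.bxor (n * 64) n) 16777216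
  let b := PySem.Int.mod (PySem.Int.bxor (PySem.Int.floordiv a 32) a) 16777216
  PySem.Int.mod (PySem.Int.bxor (b * 2048) b) 16777216

def pvBStep1 (p : List Int × Int) (_ : Int) : List Int × Int :=
  let n := pvNextSecret p.2
  (p.1 ++ [PySem.Int.mod n 10], n)

def pvBWindow (prices diffs : List Int)
    (st : Std.HashSet (List Int) × Std.HashMap (List Int) Int) (i : Int) :
    Std.HashSet (List Int) × Std.HashMap (List Int) Int :=
  let seq := PySem.List.slice diffs (some i) (some (i + 4))
  if ! st.1.contains seq then
    (st.1.insert seq,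
     st.2.insert seq (st.2.getD seq 0 + PySem.List.pyGetD prices (i + 4) 0))
  else st

def get_most_bananas_by_sequence_alt (data : List Int) : Int :=
  let totals := data.foldl
    (fun totals starting_number =>
      let pr := (PySem.List.pyRange 0 2000 1).foldl pvBStep1
        ([PySem.Int.mod starting_number 10], starting_number)
      let prices := pr.1
      let diffs := (PySem.List.pyRange 0 2000 1).map
        (fun i => PySem.List.pyGetD prices (i + 1) 0 - PySem.List.pyGetD prices i 0)
      ((PySem.List.pyRange 0 (PySem.List.len diffs - 3) 1).foldl
        (pvBWindow prices diffs) ((∅ : Std.HashSet (List Int)), totals)).2)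
    (∅ : Std.HashMap (List Int) Int)
  match PySem.List.max? totals.values (fun x => x) with
  | some m => m
  | none => 0



-- ===== PRECONDITION & SPEC =====
-- Pre_ excludes only the empty list, on which Python's max() of an empty dict raises ValueError
-- (both A and B raise there).
def Pre_get_most_bananas_by_sequence (data : List Int) : Prop := data ≠ []
instance (data : List Int) : Decidable (Pre_get_most_bananas_by_sequence data) := by unfold Pre_get_most_bananas_by_sequence; infer_instance
def pvWitness_get_most_bananas_by_sequence : List Int := [1]
def Spec_get_most_bananas_by_sequence (data : List Int) (out : Int) : Prop := out = get_most_bananas_by_sequence_alt data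
instance (data : List Int) (out : Int) : Decidable (Spec_get_most_bananas_by_sequence data out) := by unfold Spec_get_most_bananas_by_sequence; infer_instance

-- ===== CLAIM (what is proved, stated in full; the proofs are below) =====
def Claim_equal_get_most_bananas_by_sequence : Prop := ∀ (data : List Int), Dom_get_most_bananas_by_sequence data → Pre_get_most_bananas_by_sequence data → Spec_get_most_bananas_by_sequence data (get_most_bananas_by_sequence data)

-- ===== LEMMAS AND PROOFS =====
-- ==== proof-side math objects ====
def pvNums (n0 : Int) : Nat → Int
  | 0 => n0
  | k + 1 => pvNextSecret (pvNums n0 k)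

def pvPrice (n0 : Int) (k : Nat) : Int := PySem.Int.mod (pvNums n0 k) 10
def pvDif (n0 : Int) (k : Nat) : Int := pvPrice n0 (k + 1) - pvPrice n0 k
def pvWin (n0 : Int) (i : Nat) : List Int :=
  [pvDif n0 i, pvDif n0 (i + 1), pvDif n0 (i + 2), pvDif n0 (i + 3)]
def pvProc (st : Std.HashSet (List Int) × Std.HashMap (List Int) Int) (ev : List Int × Int) :
    Std.HashSet (List Int) × Std.HashMap (List Int) Int :=
  if st.1.contains ev.1 then st
  else (st.1.insert ev.1, st.2.insert ev.1 (st.2.getD ev.1 0 + ev.2))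
def pvEvents (n0 : Int) (m : Nat) : List (List Int × Int) :=
  (List.range m).map (fun i => (pvWin n0 i, pvPrice n0 (i + 4)))
def pvWseq (n0 : Int) (n : Nat) : List Int :=
  ((List.range n).map (pvDif n0)).drop (n - 4)

lemma pv_secret_one (n : Int) : secret_number n 1 = pvNextSecret n := rfl

lemma pvDictStep (d : Std.HashMap (List Int) Int) (k : List Int) (v : Int) :
    (if ! d.contains k then d.insert k v
     else d.insert k (d.getD k 0 + v)) = d.insert k (d.getD k 0 + v) := by
  cases h : d.contains k with
  | false => rw [Std.HashMap.getD_eq_fallback_of_contains_eq_false h]; simp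
  | true => rfl

lemma pvWseq_ge4 (n0 : Int) (m : Nat) : pvWseq n0 (m + 4) = pvWin n0 m := by
  unfold pvWseq pvWin
  rw [List.range_add, List.map_append]
  rw [show m + 4 - 4 = ((List.range m).map (pvDif n0)).length by simp]
  rw [List.drop_left]
  simp [List.range_succ]

lemma pvWseq_le4 (n0 : Int) (n : Nat) (h : n ≤ 4) :
    pvWseq n0 n = (List.range n).map (pvDif n0) := by
  unfold pvWseq
  rw [show n - 4 = 0 by omega, List.drop_zero]

lemma pvNums_succ (n0 : Int) (n : Nat) : pvNextSecret (pvNums n0 n) = pvNums n0 (n + 1) := rfl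
lemma pvPrice_eq (n0 : Int) (k : Nat) : PySem.Int.mod (pvNums n0 k) 10 = pvPrice n0 k := rfl
lemma pvDif_eq (n0 : Int) (n : Nat) : pvPrice n0 (n + 1) - pvPrice n0 n = pvDif n0 n := rfl

lemma pvAStep_eq (n0 : Int) (n : Nat) (S : Std.HashSet (List Int) × Std.HashMap (List Int) Int) :
    pvAStep (pvNums n0 n, pvWseq n0 n, S) =
      (pvNums n0 (n + 1), pvWseq n0 (n + 1),
        if 3 ≤ n then pvProc S (pvWin n0 (n - 3), pvPrice n0 (n + 1)) else S) := by
  rcases Nat.lt_or_ge n 3 with hn | hn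
  · -- n = 0, 1, 2 : window not yet full, nothing processed
    have h1 : pvWseq n0 n = (List.range n).map (pvDif n0) := pvWseq_le4 n0 n (by omega)
    have h2 : pvWseq n0 (n + 1) = (List.range n).map (pvDif n0) ++ [pvDif n0 n] := by
      rw [pvWseq_le4 n0 (n + 1) (by omega), List.range_succ]; simp
    simp only [pvAStep, pv_secret_one, pvNums_succ, pvPrice_eq, pvDif_eq, h1, h2]
    have hlen : PySem.List.len ((List.range n).map (pvDif n0) ++ [pvDif n0 n]) = (n : Int) + 1 := by
      simp [PySem.List.len_eq]
    rw [if_neg (show ¬ (PySem.List.len ((List.range n).map (pvDif n0) ++ [pvDif n0 n]) > 4) by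
      rw [hlen]; omega)]
    rw [if_neg (show ¬ ((PySem.List.len ((List.range n).map (pvDif n0) ++ [pvDif n0 n]) == (4 : Int)) = true) by
      rw [hlen, beq_iff_eq]; omega)]
    rw [if_neg (show ¬ 3 ≤ n by omega)]
  · obtain ⟨m, rfl⟩ : ∃ m, n = m + 3 := ⟨n - 3, by omega⟩
    rcases m with _ | j
    · -- n = 3 : the window becomes full for the first time
      have h1 : pvWseq n0 (0 + 3) = [pvDif n0 0, pvDif n0 1, pvDif n0 2] := by
        rw [pvWseq_le4 n0 (0 + 3) (by omega)]; simp [List.range_succ]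
      have h2 : pvWseq n0 (0 + 3 + 1) = pvWin n0 0 := pvWseq_ge4 n0 0
      simp only [pvAStep, pv_secret_one, pvNums_succ, pvPrice_eq, pvDif_eq, h1, h2, Nat.zero_add]
      have hkey : ([pvDif n0 0, pvDif n0 1, pvDif n0 2] ++ [pvDif n0 3]) = pvWin n0 0 := by
        simp [pvWin]
      rw [hkey]
      rw [if_neg (show ¬ (PySem.List.len (pvWin n0 0) > 4) by simp [PySem.List.len_eq, pvWin])]
      rw [if_pos (show (PySem.List.len (pvWin n0 0) == (4 : Int)) = true by
        simp [PySem.List.len_eq, pvWin])]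
      rw [if_pos (show 3 ≤ 3 by omega), show (3 : Nat) - 3 = 0 from rfl]
      cases hc : S.1.contains (pvWin n0 0) with
      | false =>
        rw [if_pos (show (!false) = true by simp)]
        rw [pvDictStep]
        simp [pvProc, hc]
      | true =>
        rw [if_neg (show ¬ ((!true) = true) by simp)]
        simp [pvProc, hc]
    · -- n = j + 4 : the window slides
      have h1 : pvWseq n0 (j + 1 + 3) = pvWin n0 j := by
        rw [show j + 1 + 3 = j + 4 by omega]; exact pvWseq_ge4 n0 j
      have h2 : pvWseq n0 (j + 1 + 3 + 1) = pvWin n0 (j + 1) := by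
        rw [show j + 1 + 3 + 1 = (j + 1) + 4 by omega]; exact pvWseq_ge4 n0 (j + 1)
      simp only [pvAStep, pv_secret_one, pvNums_succ, pvPrice_eq, pvDif_eq, h1, h2]
      have hcs1 : pvWin n0 j ++ [pvDif n0 (j + 1 + 3)] = pvDif n0 j :: pvWin n0 (j + 1) := rfl
      rw [hcs1]
      rw [if_pos (show PySem.List.len (pvDif n0 j :: pvWin n0 (j + 1)) > 4 by
        simp [PySem.List.len_eq, pvWin])]
      rw [PySem.List.pop?_zero_cons]
      rw [if_pos (show (PySem.List.len (pvWin n0 (j + 1)) == (4 : Int)) = true by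
        simp [PySem.List.len_eq, pvWin])]
      rw [if_pos (show 3 ≤ j + 1 + 3 by omega), show j + 1 + 3 - 3 = j + 1 by omega]
      cases hc : S.1.contains (pvWin n0 (j + 1)) with
      | false =>
        rw [if_pos (show (!false) = true by simp)]
        rw [pvDictStep]
        simp [pvProc, hc]
      | true =>
        rw [if_neg (show ¬ ((!true) = true) by simp)]
        simp [pvProc, hc]

lemma pvEvents_succ (n0 : Int) (m : Nat) :
    pvEvents n0 (m + 1) = pvEvents n0 m ++ [(pvWin n0 m, pvPrice n0 (m + 4))] := by
  unfold pvEvents; rw [List.range_succ]; simp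

lemma pvA_inv (n0 : Int) (d : Std.HashMap (List Int) Int) (n : Nat) :
    (PySem.List.pyRange 0 (n : Int) 1).foldl (fun st _ => pvAStep st)
      (n0, ([] : List Int), (∅ : Std.HashSet (List Int)), d)
      = (pvNums n0 n, pvWseq n0 n,
          (pvEvents n0 (n - 3)).foldl pvProc ((∅ : Std.HashSet (List Int)), d)) := by
  induction n with
  | zero =>
    rw [PySem.List.pyRange_one_eq_nil (by omega)]
    simp [pvNums, pvWseq, pvEvents, List.foldl_nil]
  | succ n ih =>
    rw [show ((n + 1 : Nat) : Int) = (n : Int) + 1 by push_cast; ring]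
    rw [PySem.List.pyRange_one_succ_right (by positivity)]
    rw [List.foldl_append, ih, List.foldl_cons, List.foldl_nil, pvAStep_eq]
    rcases Nat.lt_or_ge n 3 with hn | hn
    · rw [if_neg (by omega : ¬ 3 ≤ n), show n + 1 - 3 = n - 3 by omega]
    · rw [if_pos hn, show n + 1 - 3 = (n - 3) + 1 by omega, pvEvents_succ,
        show n - 3 + 4 = n + 1 by omega, List.foldl_append, List.foldl_cons, List.foldl_nil]

lemma pvB_phase1 (n0 : Int) (n : Nat) :
    (PySem.List.pyRange 0 (n : Int) 1).foldl pvBStep1 ([PySem.Int.mod n0 10], n0)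
      = ((List.range (n + 1)).map (pvPrice n0), pvNums n0 n) := by
  induction n with
  | zero =>
    rw [PySem.List.pyRange_one_eq_nil (by omega)]
    simp [pvNums, pvPrice, List.range_succ]
  | succ n ih =>
    rw [show ((n + 1 : Nat) : Int) = (n : Int) + 1 by push_cast; ring]
    rw [PySem.List.pyRange_one_succ_right (by positivity)]
    rw [List.foldl_append, ih, List.foldl_cons, List.foldl_nil]
    unfold pvBStep1
    rw [show List.range (n + 1 + 1) = List.range (n + 1) ++ [n + 1] from List.range_succ]
    simp only [pvNums_succ, pvPrice_eq, List.map_append, List.map_cons, List.map_nil]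

lemma pvDropTake (g : Nat → Int) (m k : Nat) (h : k + 4 ≤ m) :
    (((List.range m).map g).drop k).take 4 = [g k, g (k + 1), g (k + 2), g (k + 3)] := by
  apply List.ext_getElem
  · simp; omega
  intro i h1 h2
  simp only [List.length_take, List.length_drop, List.length_map, List.length_range] at h1
  have hi : i < 4 := by omega
  simp only [List.getElem_take, List.getElem_drop, List.getElem_map, List.getElem_range]
  interval_cases i <;> simp

lemma pvB_diffs (n0 : Int) :
    (PySem.List.pyRange 0 2000 1).map (fun i =>
        PySem.List.pyGetD ((List.range 2001).map (pvPrice n0)) (i + 1) 0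
          - PySem.List.pyGetD ((List.range 2001).map (pvPrice n0)) i 0)
      = (List.range 2000).map (pvDif n0) := by
  rw [show (2000 : Int) = ((2000 : Nat) : Int) from rfl, PySem.List.pyRange_zero_nat, List.map_map]
  apply List.map_congr_left
  intro k hk
  rw [List.mem_range] at hk
  simp only [Function.comp]
  rw [show ((k : Int) + 1) = ((k + 1 : Nat) : Int) by push_cast; ring]
  rw [PySem.List.pyGetD_natCast, PySem.List.pyGetD_natCast]
  rw [PySem.List.getD_map_range _ _ _ _ (by omega), PySem.List.getD_map_range _ _ _ _ (by omega)]
  exact pvDif_eq n0 k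

lemma pvB_window (n0 : Int) (t : Std.HashMap (List Int) Int) :
    (PySem.List.pyRange 0 1997 1).foldl
        (pvBWindow ((List.range 2001).map (pvPrice n0)) ((List.range 2000).map (pvDif n0)))
        ((∅ : Std.HashSet (List Int)), t)
      = (pvEvents n0 1997).foldl pvProc ((∅ : Std.HashSet (List Int)), t) := by
  rw [show (1997 : Int) = ((1997 : Nat) : Int) from rfl, PySem.List.pyRange_zero_nat]
  unfold pvEvents
  rw [List.foldl_map, List.foldl_map]
  apply PySem.List.foldl_congr_mem
  intro st k hk
  rw [List.mem_range] at hk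
  unfold pvBWindow pvProc
  have hseq : PySem.List.slice ((List.range 2000).map (pvDif n0)) (some (k : Int))
      (some ((k : Int) + 4)) = pvWin n0 k := by
    rw [show ((k : Int) + 4) = ((k : Int) + ((4 : Nat) : Int)) by push_cast; ring]
    rw [PySem.List.slice_natCast_add]
    exact pvDropTake (pvDif n0) 2000 k (by omega)
  have hpr : PySem.List.pyGetD ((List.range 2001).map (pvPrice n0)) ((k : Int) + 4) 0
      = pvPrice n0 (k + 4) := by
    rw [show ((k : Int) + 4) = ((k + 4 : Nat) : Int) by push_cast; ring]
    rw [PySem.List.pyGetD_natCast, PySem.List.getD_map_range _ _ _ _ (by omega)]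
  rw [hseq, hpr]
  cases hc : st.1.contains (pvWin n0 k) with
  | false => simp [hc]
  | true => simp [hc]

lemma pvBuyer (d : Std.HashMap (List Int) Int) (n0 : Int) :
    ((PySem.List.pyRange 0 2000 1).foldl (fun st _ => pvAStep st)
        (n0, ([] : List Int), (∅ : Std.HashSet (List Int)), d)).2.2.2
      = (let pr := (PySem.List.pyRange 0 2000 1).foldl pvBStep1
            ([PySem.Int.mod n0 10], n0)
         let prices := pr.1
         let diffs := (PySem.List.pyRange 0 2000 1).map
            (fun i => PySem.List.pyGetD prices (i + 1) 0 - PySem.List.pyGetD prices i 0)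
         ((PySem.List.pyRange 0 (PySem.List.len diffs - 3) 1).foldl
            (pvBWindow prices diffs) ((∅ : Std.HashSet (List Int)), d)).2) := by
  have hA := pvA_inv n0 d 2000
  rw [show (((2000 : Nat) : Int)) = (2000 : Int) from rfl,
    show (2000 : Nat) - 3 = 1997 from rfl] at hA
  rw [hA]
  have hB := pvB_phase1 n0 2000
  rw [show (((2000 : Nat) : Int)) = (2000 : Int) from rfl] at hB
  simp only [hB]
  rw [pvB_diffs]
  rw [show PySem.List.len ((List.range 2000).map (pvDif n0)) - 3 = (1997 : Int) by
    simp [PySem.List.len_eq]]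
  rw [pvB_window]

-- ===== VERDICT (by name: the statement is the Claim_ definition above) =====
theorem get_most_bananas_by_sequence_spec : Claim_equal_get_most_bananas_by_sequence := by
  intro data _hDom _hPre
  unfold Spec_get_most_bananas_by_sequence
  unfold get_most_bananas_by_sequence get_most_bananas_by_sequence_alt
  have h : data.foldl
      (fun sequences starting_number =>
        ((PySem.List.pyRange 0 2000 1).foldl (fun st _ => pvAStep st)
          (starting_number, ([] : List Int), (∅ : Std.HashSet (List Int)), sequences)).2.2.2)
      (∅ : Std.HashMap (List Int) Int)
      = data.foldl
      (fun totals starting_number =>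
        let pr := (PySem.List.pyRange 0 2000 1).foldl pvBStep1
          ([PySem.Int.mod starting_number 10], starting_number)
        let prices := pr.1
        let diffs := (PySem.List.pyRange 0 2000 1).map
          (fun i => PySem.List.pyGetD prices (i + 1) 0 - PySem.List.pyGetD prices i 0)
        ((PySem.List.pyRange 0 (PySem.List.len diffs - 3) 1).foldl
          (pvBWindow prices diffs) ((∅ : Std.HashSet (List Int)), totals)).2)
      (∅ : Std.HashMap (List Int) Int) := by
    apply PySem.List.foldl_congr_mem
    intro acc x _
    exact pvBuyer acc x
  rw [h]
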